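-- pv_equiv track=rewrite | github.com/SirCartier50/qcloud_rl | src/flowScheduler.py | find_non_overlapping_indices
-- ===== SOURCE A (Python) =====
-- def find_non_overlapping_indices(sets):
--     non_overlapping_indices = []
--
--     for i, current_set in enumerate(sets):
--         overlap = False
--         for j, other_set in enumerate(sets):
--             if i != j and not current_set.isdisjoint(other_set):
--                 overlap = True
--                 break
--         if not overlap:
--             non_overlapping_indices.append(i)
--
--     return non_overlapping_indices
-- ===== SOURCE B (Python) =====
-- def find_non_overlapping_indices(sets):
--     counts = {}
--     for s in sets:
--         for x in s:
--             counts[x] = counts.get(x, 0) + 1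
--     return [i for i, s in enumerate(sets) if all(counts[x] == 1 for x in s)]
-- ===== Notes on version B (the rewrite author's own statement) =====
-- stated objective: alternative
-- what changed: Replaces the all-pairs disjointness scan with a single pass that counts, for every element, how many sets contain it, then keeps exactly the indices whose elements all have count 1.
import Mathlib
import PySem

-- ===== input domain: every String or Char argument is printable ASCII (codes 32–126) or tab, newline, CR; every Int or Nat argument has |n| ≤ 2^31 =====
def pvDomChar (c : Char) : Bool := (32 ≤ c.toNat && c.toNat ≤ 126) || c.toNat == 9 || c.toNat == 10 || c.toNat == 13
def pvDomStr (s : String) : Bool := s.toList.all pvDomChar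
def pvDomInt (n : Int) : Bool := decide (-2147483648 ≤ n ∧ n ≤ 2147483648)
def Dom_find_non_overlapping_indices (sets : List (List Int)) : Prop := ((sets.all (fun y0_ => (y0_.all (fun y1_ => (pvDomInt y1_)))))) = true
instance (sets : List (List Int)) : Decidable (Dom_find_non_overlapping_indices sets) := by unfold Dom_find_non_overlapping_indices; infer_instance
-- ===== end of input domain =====

-- B replaces A's all-pairs disjointness scan by a one-pass element->frequency count
-- (objective: alternative algorithm; A's early break makes it fast in practice too).

-- ===== PORT A =====
-- 'overlap'-flag inner loop with break = List.any over the enumerated sets.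
def find_non_overlapping_indices (sets : List (List Int)) : List Int :=
  (PySem.List.enumerate sets 0).foldl (fun acc ic =>
    let overlap := (PySem.List.enumerate sets 0).any (fun jo =>
      ic.1 ≠ jo.1 && !(PySem.Set.isdisjoint ic.2 jo.2))
    if !overlap then acc ++ [ic.1] else acc) []

-- ===== PORT B =====
-- counts[x] = counts.get(x, 0) + 1 over every element of every set; the inner 'for x in s'
-- iterates a Python set, i.e. the distinct elements (PySem.Set.ofList s).
def pvCounts (sets : List (List Int)) : PySem.Dict Int Int :=
  sets.foldl (fun d s =>
    (PySem.Set.ofList s).foldl (fun d x => d.insert x (d.getD x 0 + 1)) d) PySem.Dict.empty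

def find_non_overlapping_indices_alt (sets : List (List Int)) : List Int :=
  let counts := pvCounts sets
  ((PySem.List.enumerate sets 0).filter (fun ic =>
      ic.2.all (fun x => counts.getD x 0 == 1))).map (·.1)

-- ===== PRECONDITION & SPEC =====
def Spec_find_non_overlapping_indices (sets : List (List Int)) (out : List Int) : Prop := out = find_non_overlapping_indices_alt sets
instance (sets : List (List Int)) (out : List Int) : Decidable (Spec_find_non_overlapping_indices sets out) := by unfold Spec_find_non_overlapping_indices; infer_instance

-- ===== CLAIM (what is proved, stated in full; the proofs are below) =====
def Claim_equal_find_non_overlapping_indices : Prop := ∀ (sets : List (List Int)), Dom_find_non_overlapping_indices sets → Spec_find_non_overlapping_indices sets (find_non_overlapping_indices sets)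

-- ===== LEMMAS AND PROOFS =====

-- the counter maps x to the number of sets that contain x
lemma counts_aux (x : Int) :
    ∀ (sets : List (List Int)) (d : PySem.Dict Int Int),
      (sets.foldl (fun d s =>
        (PySem.Set.ofList s).foldl (fun d x => d.insert x (d.getD x 0 + 1)) d) d).getD x 0
      = d.getD x 0 + (sets.countP (fun s => decide (x ∈ s)) : Int) := by
  intro sets
  induction sets with
  | nil => intro d; simp
  | cons s t ih =>
    intro d
    rw [List.foldl_cons, ih, PySem.Dict.getD_foldl_insert_add_one]
    have hc : (PySem.Set.ofList s).count x = if x ∈ s then 1 else 0 := by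
      by_cases h : x ∈ s
      · rw [List.count_eq_one_of_mem (PySem.Set.nodup_ofList s)
          ((PySem.Set.mem_ofList s x).mpr h)]
        simp [h]
      · simp [h, List.count_eq_zero_of_not_mem
          (fun hm => h ((PySem.Set.mem_ofList s x).mp hm))]
    rw [List.countP_cons, hc]
    by_cases h : x ∈ s <;> simp [h]
    ring

lemma counts_getD (sets : List (List Int)) (x : Int) :
    (pvCounts sets).getD x 0 = (sets.countP (fun s => decide (x ∈ s)) : Int) := by
  rw [pvCounts, counts_aux]; simp

-- countP = 1 iff the (known) witness index is the only index satisfying p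
lemma countP_eq_one_iff {α : Type} (p : α → Bool) :
    ∀ (l : List α) (i : Nat) (h : i < l.length), p l[i] = true →
      (l.countP p = 1 ↔ ∀ j (hj : j < l.length), j ≠ i → p l[j] = false) := by
  intro l
  induction l with
  | nil => intro i h hp; simp at h
  | cons a t ih =>
    intro i h hp
    rw [List.countP_cons]
    cases i with
    | zero =>
      simp only [List.getElem_cons_zero] at hp
      rw [hp, if_pos rfl]
      constructor
      · intro h1 j hj hji
        have h0 : t.countP p = 0 := by omega
        cases j with
        | zero => exact absurd rfl hji
        | succ k =>
          have hk : k < t.length := by simp at hj; omega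
          simp only [List.getElem_cons_succ]
          simpa using List.countP_eq_zero.mp h0 _ (List.getElem_mem hk)
      · intro hall
        have h0 : t.countP p = 0 := by
          rw [List.countP_eq_zero]
          intro b hb
          obtain ⟨k, hk, rfl⟩ := List.mem_iff_getElem.mp hb
          have h2 := hall (k+1) (by simp; omega) (Nat.succ_ne_zero k)
          simpa using h2
        omega
    | succ m =>
      simp only [List.getElem_cons_succ] at hp
      have hm : m < t.length := by simp at h; omega
      by_cases hpa : p a = true
      · rw [hpa, if_pos rfl]
        have h1 : 0 < t.countP p := List.countP_pos_iff.mpr ⟨t[m], List.getElem_mem hm, hp⟩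
        constructor
        · intro hc; exfalso; omega
        · intro hall
          have h2 := hall 0 (by simp) (by omega)
          simp only [List.getElem_cons_zero] at h2
          rw [h2] at hpa; exact absurd hpa (by simp)
      · have hpa' : p a = false := by simpa using hpa
        rw [hpa', if_neg (by simp), Nat.add_zero, ih m hm hp]
        constructor
        · intro hall j hj hji
          cases j with
          | zero => exact hpa'
          | succ k =>
            simp only [List.getElem_cons_succ]
            exact hall k (by simp at hj; omega) (by omega)
        · intro hall j hj hji
          have h2 := hall (j+1) (by simp; omega) (by omega)
          simpa using h2

-- the two per-index predicates agree on every enumerated pair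
lemma pred_agree (sets : List (List Int)) (ic : Int × List Int)
    (hm : ic ∈ PySem.List.enumerate sets 0) :
    (!((PySem.List.enumerate sets 0).any (fun jo =>
        ic.1 ≠ jo.1 && !(PySem.Set.isdisjoint ic.2 jo.2))))
    = ic.2.all (fun x => (pvCounts sets).getD x 0 == 1) := by
  obtain ⟨k, hk, rfl⟩ := (PySem.List.mem_enumerate_iff sets 0 ic).mp hm
  simp only [zero_add]
  rw [Bool.eq_iff_iff]
  simp only [Bool.not_eq_true', List.any_eq_false, List.all_eq_true,
    Bool.and_eq_true, Bool.not_eq_true', decide_eq_true_eq, not_and,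
    beq_iff_eq]
  constructor
  · intro hnone x hx
    rw [counts_getD]
    have h1 : sets.countP (fun s => decide (x ∈ s)) = 1 := by
      rw [countP_eq_one_iff _ sets k hk (by simpa using hx)]
      intro j hj hji
      have := hnone _ ((PySem.List.mem_enumerate_iff sets 0 _).mpr ⟨j, hj, rfl⟩)
      simp only [zero_add] at this
      have hd := this (by exact_mod_cast fun h => hji (by omega))
      rw [Bool.not_eq_false, PySem.Set.isdisjoint_iff] at hd
      simpa using hd x hx
    rw [h1]; norm_num
  · intro hall jo hjo hne
    obtain ⟨j, hj, rfl⟩ := (PySem.List.mem_enumerate_iff sets 0 jo).mp hjo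
    simp only [zero_add] at hne ⊢
    rw [Bool.not_eq_false, PySem.Set.isdisjoint_iff]
    intro x hx
    have hc := hall x hx
    rw [counts_getD] at hc
    have h1 : sets.countP (fun s => decide (x ∈ s)) = 1 := by exact_mod_cast hc
    rw [countP_eq_one_iff _ sets k hk (by simpa using hx)] at h1
    have hjk : j ≠ k := by intro h; exact hne (by rw [h])
    have := h1 j hj hjk
    simpa using this

-- ===== VERDICT (by name: the statement is the Claim_ definition above) =====
theorem find_non_overlapping_indices_spec : Claim_equal_find_non_overlapping_indices := by
  intro sets _
  unfold Spec_find_non_overlapping_indices find_non_overlapping_indices find_non_overlapping_indices_alt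
  simp only []
  rw [show (List.foldl
      (fun acc ic =>
        if (!(PySem.List.enumerate sets 0).any fun jo => decide (ic.1 ≠ jo.1) && !PySem.Set.isdisjoint ic.2 jo.2) = true then
          acc ++ [ic.1]
        else acc)
      [] (PySem.List.enumerate sets 0))
    = [] ++ ((PySem.List.enumerate sets 0).filter
        (fun ic => !(PySem.List.enumerate sets 0).any fun jo => decide (ic.1 ≠ jo.1) && !PySem.Set.isdisjoint ic.2 jo.2)).map (fun ic => ic.1)
    from PySem.List.foldl_append_if
      (p := fun ic => !((PySem.List.enumerate sets 0).any fun jo => decide (ic.1 ≠ jo.1) && !PySem.Set.isdisjoint ic.2 jo.2))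
      (f := fun ic => ic.1) (PySem.List.enumerate sets 0) []]
  rw [List.nil_append]
  rw [List.filter_congr (fun ic hm => pred_agree sets ic hm)]
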